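-- pv_equiv track=rewrite | github.com/mohitsharma7799/OS-Project | realtime_scheduler_simulator.py | compress_timeline
-- ===== SOURCE A (Python) =====
-- def compress_timeline(timeline):
--     if not timeline:
--         return []
--
--     blocks = []
--     start = timeline[0][0]
--     current_task = timeline[0][1]
--
--     for i in range(1, len(timeline)):
--         time, task = timeline[i]
--         if task != current_task:
--             blocks.append((start, time, current_task))
--             start = time
--             current_task = task
--
--     blocks.append((start, timeline[-1][0] + 1, current_task))
--     return blocks
-- ===== SOURCE B (Python) =====
-- def compress_timeline(timeline):
--     if not timeline:
--         return []
--     # phase 1: one entry per maximal run (its first time and task)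
--     runs = [timeline[0]] + [cur for prev, cur in zip(timeline, timeline[1:])
--                             if cur[1] != prev[1]]
--     # phase 2: each block ends where the next run starts; the last at last_time + 1
--     ends = [t for t, _ in runs[1:]] + [timeline[-1][0] + 1]
--     return [(s, e, k) for (s, k), e in zip(runs, ends)]
-- ===== Notes on version B (the rewrite author's own statement) =====
-- stated objective: alternative
-- what changed: Replaces A's single stateful loop (carrying start/current_task and appending blocks in-flight plus a trailing append) with a two-phase decomposition: first group the timeline into runs by comparing each entry with its predecessor via zip, then derive each block's end from the next run's start (last block ends at last_time + 1).
import Mathlib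
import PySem

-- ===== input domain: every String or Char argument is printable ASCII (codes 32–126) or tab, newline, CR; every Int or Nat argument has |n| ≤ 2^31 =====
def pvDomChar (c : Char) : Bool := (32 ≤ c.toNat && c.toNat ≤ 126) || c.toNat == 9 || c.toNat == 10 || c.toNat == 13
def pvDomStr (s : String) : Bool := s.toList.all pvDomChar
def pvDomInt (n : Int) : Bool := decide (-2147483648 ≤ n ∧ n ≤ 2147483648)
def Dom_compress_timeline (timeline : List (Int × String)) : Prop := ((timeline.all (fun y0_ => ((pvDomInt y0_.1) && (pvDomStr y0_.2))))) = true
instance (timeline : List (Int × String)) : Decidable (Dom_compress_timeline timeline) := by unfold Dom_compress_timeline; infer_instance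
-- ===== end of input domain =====

-- B differs by decomposition: runs first, then block ends from the successor run (proved equal to A).

-- ===== PORT A =====
-- A: stateful index loop over range(1, len) carrying (blocks, start, current_task), plus a final append.
def compress_timeline (timeline : List (Int × String)) : List (Int × Int × String) :=
  match timeline with
  | [] => []
  | (t0, k0) :: _ =>
    let s := (PySem.List.pyRange 1 (PySem.List.len timeline) 1).foldl
      (fun (acc : List (Int × Int × String) × Int × String) i =>
        let tt := PySem.List.pyGetD timeline i (0, "")   -- index provably in range(1, len)
        if tt.2 ≠ acc.2.2 then (acc.1 ++ [(acc.2.1, tt.1, acc.2.2)], tt.1, tt.2)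
        else acc)
      ([], t0, k0)
    s.1 ++ [(s.2.1, (PySem.List.pyGetD timeline (-1) (0, "")).1 + 1, s.2.2)]

-- ===== PORT B =====
-- B: runs via zip of the list with its tail, then blocks by zipping runs with the shifted start list.
def compress_timeline_alt (timeline : List (Int × String)) : List (Int × Int × String) :=
  match timeline with
  | [] => []
  | first :: _ =>
    let runs := first :: (timeline.zip (timeline.drop 1)).filterMap
        (fun pc => if pc.2.2 ≠ pc.1.2 then some pc.2 else none)
    let ends := (runs.drop 1).map Prod.fst ++ [(PySem.List.pyGetD timeline (-1) (0, "")).1 + 1]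
    (runs.zip ends).map (fun p => (p.1.1, p.2, p.1.2))

-- ===== PRECONDITION & SPEC =====
def Spec_compress_timeline (timeline : List (Int × String)) (out : List (Int × Int × String)) : Prop := out = compress_timeline_alt timeline
instance (timeline : List (Int × String)) (out : List (Int × Int × String)) : Decidable (Spec_compress_timeline timeline out) := by unfold Spec_compress_timeline; infer_instance

-- ===== CLAIM (what is proved, stated in full; the proofs are below) =====
def Claim_equal_compress_timeline : Prop := ∀ (timeline : List (Int × String)), Dom_compress_timeline timeline → Spec_compress_timeline timeline (compress_timeline timeline)

-- ===== LEMMAS AND PROOFS =====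

-- the first element of every maximal run after a head with task k
def pvRuns (k : String) : List (Int × String) → List (Int × String)
  | [] => []
  | (t, s) :: rest => (if s ≠ k then [(t, s)] else []) ++ pvRuns s rest

-- blocks from a run list: each ends at the next run's start, the last at `last`
def pvBlocks (last : Int) : List (Int × String) → List (Int × Int × String)
  | [] => []
  | [(t, s)] => [(t, last, s)]
  | (t, s) :: (t', s') :: rest => (t, t', s) :: pvBlocks last ((t', s') :: rest)

theorem pvRuns_zip (x : Int × String) (rest : List (Int × String)) :
    ((x :: rest).zip rest).filterMap
        (fun pc => if pc.2.2 ≠ pc.1.2 then some pc.2 else none)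
      = pvRuns x.2 rest := by
  induction rest generalizing x with
  | nil => simp [pvRuns]
  | cons y ys ih =>
    obtain ⟨t, s⟩ := y
    rw [List.zip_cons_cons, List.filterMap_cons, ih (t, s)]
    by_cases h : s = x.2 <;> simp [pvRuns, h]

theorem pvBlocks_zip (last : Int) (runs : List (Int × String)) :
    (runs.zip ((runs.drop 1).map Prod.fst ++ [last])).map (fun p => (p.1.1, p.2, p.1.2))
      = pvBlocks last runs := by
  induction runs with
  | nil => simp [pvBlocks]
  | cons r rs ih =>
    cases rs with
    | nil => simp [pvBlocks]
    | cons r' rs' =>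
      obtain ⟨t, s⟩ := r
      simp only [List.drop_succ_cons, List.drop_zero, List.map_cons,
        pvBlocks]
      exact congrArg _ ih

theorem pvLoopA (rest : List (Int × String)) (blocks : List (Int × Int × String))
    (t : Int) (k : String) (last : Int) :
    (rest.foldl
        (fun (acc : List (Int × Int × String) × Int × String) (tt : Int × String) =>
          if tt.2 ≠ acc.2.2 then (acc.1 ++ [(acc.2.1, tt.1, acc.2.2)], tt.1, tt.2)
          else acc)
        (blocks, t, k)).1
      ++ [((rest.foldl
        (fun (acc : List (Int × Int × String) × Int × String) (tt : Int × String) =>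
          if tt.2 ≠ acc.2.2 then (acc.1 ++ [(acc.2.1, tt.1, acc.2.2)], tt.1, tt.2)
          else acc)
        (blocks, t, k)).2.1, last, (rest.foldl
        (fun (acc : List (Int × Int × String) × Int × String) (tt : Int × String) =>
          if tt.2 ≠ acc.2.2 then (acc.1 ++ [(acc.2.1, tt.1, acc.2.2)], tt.1, tt.2)
          else acc)
        (blocks, t, k)).2.2)]
      = blocks ++ pvBlocks last ((t, k) :: pvRuns k rest) := by
  induction rest generalizing blocks t k with
  | nil => simp [pvBlocks, pvRuns]
  | cons y ys ih =>
    obtain ⟨t', s'⟩ := y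
    by_cases h : s' = k
    · simpa [List.foldl_cons, pvRuns, h] using ih blocks t k
    · simpa [List.foldl_cons, pvRuns, h, pvBlocks] using ih (blocks ++ [(t, t', k)]) t' s'

-- ===== VERDICT (by name: the statement is the Claim_ definition above) =====
theorem compress_timeline_spec : Claim_equal_compress_timeline := by
  intro timeline _
  unfold Spec_compress_timeline compress_timeline compress_timeline_alt
  match timeline with
  | [] => rfl
  | (t0, k0) :: rest =>
    simp only
    rw [PySem.List.foldl_pyRange_pyGetD ((t0, k0) :: rest) ((0 : Int), "")
          (fun (acc : List (Int × Int × String) × Int × String) (tt : Int × String) =>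
            if tt.2 ≠ acc.2.2 then (acc.1 ++ [(acc.2.1, tt.1, acc.2.2)], tt.1, tt.2) else acc)
          ([], t0, k0) (by norm_num)]
    simp only [Int.toNat_one, List.drop_succ_cons, List.drop_zero]
    rw [pvLoopA, pvRuns_zip (t0, k0) rest, ← pvBlocks_zip]
    simp
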